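-- pv_equiv track=rewrite | github.com/ejkej47/Preferans2 | agents/pimc_bot.py | _daj_validne
-- ===== SOURCE A (Python) =====
-- def _daj_validne(ruka, na_stolu, adut):
--     """Ultra-brza provera legalnih karata za Minimax stablo"""
--     if not na_stolu: return list(ruka)
--     prva_boja = na_stolu[0][1].split()[1]
--     boja = [k for k in ruka if k.split()[1] == prva_boja]
--     if boja: return boja
--
--     if adut not in ["Betl", "Sans"]:
--         aduti = [k for k in ruka if k.split()[1] == adut]
--         if aduti: return aduti
--
--     return list(ruka)
-- ===== SOURCE B (Python) =====
-- def _daj_validne(ruka, na_stolu, adut):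
--     """Group the hand by suit into a dict once, then answer by two lookups
--     (lead-suit bucket, then trump bucket) instead of filtering the hand
--     per candidate suit."""
--     if not na_stolu:
--         return list(ruka)
--     by_suit = {}
--     for k in ruka:
--         by_suit.setdefault(k.split()[1], []).append(k)
--     lead = by_suit.get(na_stolu[0][1].split()[1])
--     if lead:
--         return lead
--     if adut not in ("Betl", "Sans"):
--         trump = by_suit.get(adut)
--         if trump:
--             return trump
--     return list(ruka)
-- ===== Notes on version B (the rewrite author's own statement) =====
-- stated objective: alternative
-- what changed: Builds a suit-to-cards dictionary index of the hand in one grouping pass and answers with two O(1) bucket lookups, replacing A's per-suit list comprehensions that rescan the hand.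
import Mathlib
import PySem

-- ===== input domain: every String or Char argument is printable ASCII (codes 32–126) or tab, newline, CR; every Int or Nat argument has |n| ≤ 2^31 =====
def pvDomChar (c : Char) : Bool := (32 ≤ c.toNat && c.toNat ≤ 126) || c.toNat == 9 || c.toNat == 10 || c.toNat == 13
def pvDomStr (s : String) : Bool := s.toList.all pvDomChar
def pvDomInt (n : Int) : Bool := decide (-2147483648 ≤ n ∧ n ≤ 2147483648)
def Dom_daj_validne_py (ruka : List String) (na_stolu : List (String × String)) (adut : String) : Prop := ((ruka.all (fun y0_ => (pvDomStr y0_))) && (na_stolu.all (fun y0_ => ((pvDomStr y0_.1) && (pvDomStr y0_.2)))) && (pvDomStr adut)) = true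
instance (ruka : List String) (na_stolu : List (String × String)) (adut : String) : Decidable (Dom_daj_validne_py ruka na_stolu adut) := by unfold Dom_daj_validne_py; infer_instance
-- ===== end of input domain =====

-- B builds a suit→cards dictionary index of the hand in one grouping pass and
-- answers by two bucket lookups, instead of A's per-suit list comprehensions.

-- ===== PORT A =====
-- k.split()[1]; inside Pre_ the index is always in range, so getD "" never fires
def pvTok1 (s : String) : String := (PySem.List.pyGet? (PySem.Str.split₀ s) 1).getD ""

def daj_validne_py (ruka : List String) (na_stolu : List (String × String)) (adut : String) : List String :=
  match na_stolu with
  | [] => ruka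
  | c :: _ =>
    let prva_boja := pvTok1 c.2
    let boja := ruka.filter (fun k => pvTok1 k == prva_boja)
    if boja ≠ [] then boja
    else if !(["Betl", "Sans"].contains adut) then
      let aduti := ruka.filter (fun k => pvTok1 k == adut)
      if aduti ≠ [] then aduti else ruka
    else ruka

-- ===== PORT B =====
-- by_suit.setdefault(suit, []).append(k)  =  d.modify suit [] (· ++ [k])
def daj_validne_py_alt (ruka : List String) (na_stolu : List (String × String)) (adut : String) : List String :=
  match na_stolu with
  | [] => ruka
  | c :: _ =>
    let by_suit := ruka.foldl
      (fun (d : PySem.Dict String (List String)) k => d.modify (pvTok1 k) [] (· ++ [k]))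
      PySem.Dict.empty
    let lead := by_suit.getD (pvTok1 c.2) []
    if lead ≠ [] then lead
    else if !(adut == "Betl" || adut == "Sans") then
      let trump := by_suit.getD adut []
      if trump ≠ [] then trump else ruka
    else ruka

-- ===== PRECONDITION & SPEC =====
-- Pre_ excludes exactly the inputs where Python A raises IndexError: when a trick
-- has been led, the led card and every card in the hand must split into ≥ 2 words.
def Pre_daj_validne_py (ruka : List String) (na_stolu : List (String × String)) (adut : String) : Prop :=
  na_stolu ≠ [] → (2 ≤ (PySem.Str.split₀ (na_stolu.headD ("", "")).2).length ∧
    ∀ k ∈ ruka, 2 ≤ (PySem.Str.split₀ k).length)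
instance (ruka : List String) (na_stolu : List (String × String)) (adut : String) : Decidable (Pre_daj_validne_py ruka na_stolu adut) := by unfold Pre_daj_validne_py; infer_instance

def pvWitness_daj_validne_py : List String × (List (String × String)) × String :=
  (["7 Herc", "8 Karo"], [("p1", "9 Karo")], "Herc")

def Spec_daj_validne_py (ruka : List String) (na_stolu : List (String × String)) (adut : String) (out : List String) : Prop := out = daj_validne_py_alt ruka na_stolu adut
instance (ruka : List String) (na_stolu : List (String × String)) (adut : String) (out : List String) : Decidable (Spec_daj_validne_py ruka na_stolu adut out) := by unfold Spec_daj_validne_py; infer_instance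

-- ===== CLAIM (what is proved, stated in full; the proofs are below) =====
def Claim_equal_daj_validne_py : Prop := ∀ (ruka : List String) (na_stolu : List (String × String)) (adut : String), Dom_daj_validne_py ruka na_stolu adut → Pre_daj_validne_py ruka na_stolu adut → Spec_daj_validne_py ruka na_stolu adut (daj_validne_py ruka na_stolu adut)

-- ===== LEMMAS AND PROOFS =====

-- each bucket of the grouping dict is exactly the filter of the hand by that suit
theorem getD_group_fold (l : List String) (d : PySem.Dict String (List String)) (s : String) :
    (l.foldl (fun (d : PySem.Dict String (List String)) k =>
        d.modify (pvTok1 k) [] (· ++ [k])) d).getD s []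
      = d.getD s [] ++ l.filter (fun k => pvTok1 k == s) := by
  induction l generalizing d with
  | nil => simp
  | cons x xs ih =>
    simp only [List.foldl_cons, List.filter_cons, ih, PySem.Dict.getD_modify]
    by_cases h : s = pvTok1 x
    · simp [h]
    · have : (pvTok1 x == s) = false := by
        simpa using fun e => h e.symm
      simp [h, this]

theorem daj_validne_eq (ruka : List String) (na_stolu : List (String × String)) (adut : String) :
    daj_validne_py ruka na_stolu adut = daj_validne_py_alt ruka na_stolu adut := by
  unfold daj_validne_py daj_validne_py_alt
  cases na_stolu with
  | nil => rfl
  | cons c rest =>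
    simp only [getD_group_fold, PySem.Dict.getD_empty, List.nil_append]
    have hmem : (["Betl", "Sans"].contains adut) = (adut == "Betl" || adut == "Sans") := by
      simp only [List.contains_cons, List.contains_nil, Bool.or_false]
    rw [hmem]

-- ===== VERDICT (by name: the statement is the Claim_ definition above) =====
theorem daj_validne_py_spec : Claim_equal_daj_validne_py := by
  intro ruka na_stolu adut _ _
  exact daj_validne_eq ruka na_stolu adut
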